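-- pv_equiv track=rewrite | github.com/hyjoo1226/Algorithm | 백준/Study/F2 - XNOR의 반란.py | adjacent_subsets_iterative
-- ===== SOURCE A (Python) =====
-- def adjacent_subsets_iterative(arr):
--     result = []
--     n = len(arr)
--
--     # 비트마스크를 사용하여 모든 가능한 조합 생성
--     for mask in range(1 << n):
--         subset = []
--         valid = True
--         last_selected = -2
--
--         # 각 비트 확인
--         for i in range(n):
--             if mask & (1 << i):
--                 # 인접하지 않은 원소가 선택되었는지 확인
--                 if i - last_selected == 1:
--                     subset.append(arr[i])
--                 elif not subset:  # 첫 원소 선택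
--                     subset.append(arr[i])
--                 else:
--                     valid = False
--                     break
--                 last_selected = i
--
--         if valid and subset:
--             result.append(subset)
--
--     return result
-- ===== SOURCE B (Python) =====
-- def adjacent_subsets_iterative(arr):
--     # The masks A accepts are exactly the contiguous bit runs; sorted by mask
--     # value they are ordered first by the run's end index e, then by length l.
--     return [arr[e - l + 1 : e + 1] for e in range(len(arr)) for l in range(1, e + 2)]
-- ===== Notes on version B (the rewrite author's own statement) =====
-- stated objective: faster
-- what changed: Replaces the O(2^n) bitmask enumeration (checking each mask for contiguity) with a direct double loop over (end, length) pairs that emits each contiguous slice in mask order.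
import Mathlib
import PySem

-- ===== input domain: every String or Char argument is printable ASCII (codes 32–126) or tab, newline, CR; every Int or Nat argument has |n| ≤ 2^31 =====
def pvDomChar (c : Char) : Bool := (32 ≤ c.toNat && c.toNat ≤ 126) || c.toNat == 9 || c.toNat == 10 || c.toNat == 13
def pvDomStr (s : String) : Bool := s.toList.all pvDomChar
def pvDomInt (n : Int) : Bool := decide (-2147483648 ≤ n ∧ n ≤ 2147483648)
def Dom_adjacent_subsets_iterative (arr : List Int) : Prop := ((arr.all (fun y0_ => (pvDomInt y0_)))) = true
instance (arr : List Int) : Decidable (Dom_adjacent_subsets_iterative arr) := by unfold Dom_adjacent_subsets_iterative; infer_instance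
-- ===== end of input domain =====

-- B replaces A's O(2^n · n) scan of all bitmasks by a direct O(n³) double loop
-- over the (end index, length) pairs naming the contiguous runs, in mask order.

-- ===== PORT A =====
-- inner 'for i in range(n)' loop of A; state = (subset, last_selected, valid);
-- returning early with valid = false is Python's 'valid = False; break'.
def innerGoA (arr : List Int) (mask : Int) : List Nat → List Int → Int → List Int × Int × Bool
  | [], subset, last => (subset, last, true)
  | i :: rest, subset, last =>
    if PySem.Int.band mask ((1 : Int) <<< i) ≠ 0 then
      if (i : Int) - last = 1 then
        innerGoA arr mask rest (subset ++ [arr.getD i 0]) (i : Int)   -- arr[i]: 0 ≤ i < len arr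
      else if subset = [] then
        innerGoA arr mask rest (subset ++ [arr.getD i 0]) (i : Int)   -- arr[i]: 0 ≤ i < len arr
      else
        (subset, last, false)
    else
      innerGoA arr mask rest subset last

def adjacent_subsets_iterative (arr : List Int) : List (List Int) :=
  let n := arr.length
  (PySem.List.pyRange 0 ((1 : Int) <<< n) 1).foldl
    (fun result mask =>
      let st := innerGoA arr mask (List.range n) [] (-2)   -- (subset, last_selected, valid)
      if st.2.2 = true ∧ st.1 ≠ [] then result ++ [st.1] else result)
    []

-- ===== PORT B =====
def adjacent_subsets_iterative_alt (arr : List Int) : List (List Int) :=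
  (PySem.List.pyRange 0 arr.length 1).flatMap (fun e =>
    (PySem.List.pyRange 1 (e + 2) 1).map (fun l =>
      PySem.List.slice arr (some (e - l + 1)) (some (e + 1))))

-- ===== PRECONDITION & SPEC =====
def Spec_adjacent_subsets_iterative (arr : List Int) (out : List (List Int)) : Prop := out = adjacent_subsets_iterative_alt arr
instance (arr : List Int) (out : List (List Int)) : Decidable (Spec_adjacent_subsets_iterative arr out) := by unfold Spec_adjacent_subsets_iterative; infer_instance

-- ===== CLAIM (what is proved, stated in full; the proofs are below) =====
def Claim_equal_adjacent_subsets_iterative : Prop := ∀ (arr : List Int), Dom_adjacent_subsets_iterative arr → Spec_adjacent_subsets_iterative arr (adjacent_subsets_iterative arr)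

-- ===== LEMMAS AND PROOFS =====

-- arr[s:t+1], the contiguous slice from s through t
def sliceN (arr : List Int) (s t : Nat) : List Int := (arr.drop s).take (t + 1 - s)

-- proof-side copy of the inner loop with a Nat mask tested by testBit
def innerN (arr : List Int) (r : Nat) : List Nat → List Int → Int → List Int × Int × Bool
  | [], subset, last => (subset, last, true)
  | i :: rest, subset, last =>
    if r.testBit i then
      if (i : Int) - last = 1 then
        innerN arr r rest (subset ++ [arr.getD i 0]) (i : Int)
      else if subset = [] then
        innerN arr r rest (subset ++ [arr.getD i 0]) (i : Int)
      else
        (subset, last, false)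
    else
      innerN arr r rest subset last

-- masks whose set bits form one nonempty contiguous run inside [0, n)
def goodB (n r : Nat) : Bool := decide (∃ s < n, ∃ t < n, s ≤ t ∧ r = 2 ^ (t + 1) - 2 ^ s)

theorem bit_test_eq (r i : Nat) :
    (PySem.Int.band (r : Int) ((1 : Int) <<< i) ≠ 0) ↔ r.testBit i = true := by
  have h1 : ((1 : Int) <<< i) = (((1 <<< i : Nat) : Int)) := by simp
  have key : r &&& 1 <<< i = (r.testBit i).toNat * 2 ^ i := by
    rw [Nat.one_shiftLeft]; exact Nat.and_two_pow r i
  have hp : 0 < 2 ^ i := by positivity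
  rw [h1, PySem.Int.band_natCast, Int.natCast_ne_zero, key]
  cases h : r.testBit i <;> simp

theorem innerGoA_eq_innerN (arr : List Int) (r : Nat) (is : List Nat)
    (sub : List Int) (last : Int) :
    innerGoA arr (r : Int) is sub last = innerN arr r is sub last := by
  induction is generalizing sub last with
  | nil => rfl
  | cons i rest ih =>
    simp only [innerGoA, innerN]
    by_cases hb : r.testBit i = true
    · rw [if_pos ((bit_test_eq r i).mpr hb), if_pos hb]
      split_ifs <;> simp [ih]
    · rw [if_neg (fun hc => hb ((bit_test_eq r i).mp hc)),
        if_neg (by simpa using hb), ih]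

theorem innerN_append (arr : List Int) (r : Nat) (is js : List Nat)
    (sub : List Int) (last : Int) :
    innerN arr r (is ++ js) sub last =
      (if (innerN arr r is sub last).2.2 then
        innerN arr r js (innerN arr r is sub last).1 (innerN arr r is sub last).2.1
      else innerN arr r is sub last) := by
  induction is generalizing sub last with
  | nil => simp [innerN]
  | cons i rest ih =>
    simp only [List.cons_append, innerN]
    split_ifs <;> first | (rw [ih]; split_ifs) <;> simp_all | simp_all

theorem innerN_congr (arr : List Int) (r r' : Nat) (is : List Nat)
    (h : ∀ i ∈ is, r.testBit i = r'.testBit i) (sub : List Int) (last : Int) :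
    innerN arr r is sub last = innerN arr r' is sub last := by
  induction is generalizing sub last with
  | nil => rfl
  | cons i rest ih =>
    have hi := h i (by simp)
    have hrest : ∀ j ∈ rest, r.testBit j = r'.testBit j := fun j hj => h j (by simp [hj])
    simp only [innerN, hi]
    split_ifs <;> simp [ih hrest]

theorem innerN_skip (arr : List Int) (r : Nat) (is : List Nat)
    (h : ∀ i ∈ is, r.testBit i = false) (sub : List Int) (last : Int) :
    innerN arr r is sub last = (sub, last, true) := by
  induction is generalizing sub last with
  | nil => rfl
  | cons i rest ih =>
    have hi := h i (by simp)
    simp only [innerN, hi]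
    exact ih (fun j hj => h j (by simp [hj])) sub last

-- bits of the run mask 2^(t+1) - 2^s
theorem run_testBit (s t i : Nat) (hst : s ≤ t) :
    (2 ^ (t + 1) - 2 ^ s).testBit i = (decide (s ≤ i) && decide (i ≤ t)) := by
  have hts : t + 1 - s + s = t + 1 := by omega
  have h : 2 ^ (t + 1) - 2 ^ s = (2 ^ (t + 1 - s) - 1) <<< s := by
    rw [Nat.shiftLeft_eq, Nat.sub_mul, ← Nat.pow_add, hts, one_mul]
  rw [h, Nat.testBit_shiftLeft, Nat.testBit_two_pow_sub_one]
  by_cases h1 : s ≤ i <;> by_cases h2 : i ≤ t <;> simp [h1, h2] <;> omega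

-- low bits of 2^n + q agree with q
theorem testBit_pow_add (n q i : Nat) (hi : i < n) :
    (2 ^ n + q).testBit i = q.testBit i := by
  have h1 : (2 ^ n + q) % 2 ^ (i + 1) = q % 2 ^ (i + 1) := by
    have h2 : 2 ^ n = 2 ^ (i + 1) * 2 ^ (n - i - 1) := by
      rw [← Nat.pow_add]; congr 1; omega
    rw [h2, Nat.add_comm, Nat.add_mul_mod_self_left]
  calc (2 ^ n + q).testBit i = ((2 ^ n + q) % 2 ^ (i + 1)).testBit i := by
        rw [Nat.testBit_mod_two_pow]; simp
    _ = (q % 2 ^ (i + 1)).testBit i := by rw [h1]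
    _ = q.testBit i := by rw [Nat.testBit_mod_two_pow]; simp

theorem sliceN_snoc (arr : List Int) (s t : Nat) (hs : s ≤ t + 1) (ht : t + 1 < arr.length) :
    sliceN arr s t ++ [arr.getD (t + 1) 0] = sliceN arr s (t + 1) := by
  unfold sliceN
  have hidx : (arr.drop s)[t + 1 - s]? = some (arr.getD (t + 1) 0) := by
    rw [List.getElem?_drop, show s + (t + 1 - s) = t + 1 by omega,
      List.getElem?_eq_getElem ht]
    simp [List.getD, List.getElem?_eq_getElem ht]
  rw [show t + 1 + 1 - s = (t + 1 - s) + 1 by omega, List.take_add_one, hidx]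
  simp

theorem sliceN_single (arr : List Int) (s : Nat) (hs : s < arr.length) :
    sliceN arr s s = [arr.getD s 0] := by
  unfold sliceN
  simp [show s + 1 - s = 1 by omega]
  rw [List.take_one]
  simp [List.head?_drop, List.getElem?_eq_getElem hs]

theorem sliceN_ne_nil (arr : List Int) (s t : Nat) (hst : s ≤ t) (ht : t < arr.length) :
    sliceN arr s t ≠ [] := by
  unfold sliceN
  simp
  constructor <;> omega

-- run walk: processing indices j..t of a run mask extends the slice step by step
theorem innerN_run (arr : List Int) (s t : Nat) (hst : s ≤ t) (ht : t < arr.length) :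
    ∀ m j, s + 1 ≤ j → j + m = t + 1 →
      innerN arr (2 ^ (t + 1) - 2 ^ s) (List.range' j m) (sliceN arr s (j - 1)) ((j : Int) - 1) =
        (sliceN arr s t, (t : Int), true) := by
  intro m
  induction m with
  | zero =>
    intro j hj1 hj2
    have : j = t + 1 := by omega
    subst this
    simp [innerN, sliceN]
  | succ m ih =>
    intro j hj1 hj2
    have hjt : j ≤ t := by omega
    have hbit : (2 ^ (t + 1) - 2 ^ s).testBit j = true := by
      rw [run_testBit s t j hst]; simp; omega
    have hcond : (j : Int) - ((j : Int) - 1) = 1 := by ring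
    rw [List.range'_succ]
    simp only [innerN, hbit, if_pos hcond, if_true]
    have hsnoc : sliceN arr s (j - 1) ++ [arr.getD j 0] = sliceN arr s j := by
      have := sliceN_snoc arr s (j - 1) (by omega) (by omega)
      rwa [show j - 1 + 1 = j by omega] at this
    rw [hsnoc]
    have := ih (j + 1) (by omega) (by omega)
    rw [show ((j : Nat) + 1 - 1) = j by omega] at this
    push_cast at this
    rw [show ((j : Int) + 1 - 1) = (j : Int) by ring] at this
    exact this

-- evaluation of the inner loop on a run mask
theorem innerN_good (arr : List Int) (n s t : Nat) (hn : n ≤ arr.length)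
    (hst : s ≤ t) (ht : t < n) :
    innerN arr (2 ^ (t + 1) - 2 ^ s) (List.range n) [] (-2) = (sliceN arr s t, (t : Int), true) := by
  have hsplit : List.range n =
      List.range' 0 s ++ ([s] ++ (List.range' (s + 1) (t - s) ++ List.range' (t + 1) (n - t - 1))) := by
    have app : ∀ a m b k, b = a + m →
        List.range' a m ++ List.range' b k = List.range' a (m + k) := by
      intro a m b k h; subst h; exact List.range'_append_1
    rw [show [s] = List.range' s 1 by simp]
    rw [app (s + 1) (t - s) (t + 1) _ (by omega), app s 1 (s + 1) _ (by omega),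
      app 0 s s _ (by omega), List.range_eq_range']
    congr 1; omega
  rw [hsplit, innerN_append]
  have h1 : innerN arr (2 ^ (t + 1) - 2 ^ s) (List.range' 0 s) [] (-2) = ([], -2, true) := by
    apply innerN_skip
    intro i hi
    have : i < s := by have := List.mem_range'_1.mp hi; omega
    rw [run_testBit s t i hst]; simp; omega
  rw [h1]
  simp only [if_true]
  rw [innerN_append]
  have hbit : (2 ^ (t + 1) - 2 ^ s).testBit s = true := by
    rw [run_testBit s t s hst]; simp; omega
  have hcond : ¬ ((s : Int) - (-2) = 1) := by omega
  have h2 : innerN arr (2 ^ (t + 1) - 2 ^ s) [s] [] (-2) = (sliceN arr s s, (s : Int), true) := by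
    simp only [innerN, hbit, if_neg hcond, if_true]
    rw [sliceN_single arr s (by omega)]
    simp
  rw [h2]
  simp only [if_true]
  rw [innerN_append]
  have h3 : innerN arr (2 ^ (t + 1) - 2 ^ s) (List.range' (s + 1) (t - s)) (sliceN arr s s) (s : Int) =
      (sliceN arr s t, (t : Int), true) := by
    have := innerN_run arr s t hst (by omega) (t - s) (s + 1) (by omega) (by omega)
    rw [show (s : Nat) + 1 - 1 = s by omega] at this
    push_cast at this
    rw [show ((s : Int) + 1 - 1) = (s : Int) by ring] at this
    exact this
  rw [h3]
  simp only [if_true]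
  apply innerN_skip
  intro i hi
  have : t + 1 ≤ i := by have := List.mem_range'_1.mp hi; omega
  rw [run_testBit s t i hst]; simp; omega

-- the inner loop rejects every nonzero mask that is not a run
theorem innerN_bad (arr : List Int) :
    ∀ n, n ≤ arr.length → ∀ r, r < 2 ^ n → r ≠ 0 → goodB n r = false →
      (innerN arr r (List.range n) [] (-2)).2.2 = false := by
  intro n
  induction n with
  | zero => intro _ r hr hr0 _; omega
  | succ n ih =>
    intro hn r hr hr0 hbad
    rw [List.range_succ, innerN_append]
    by_cases hb : r.testBit n = true
    · have hrge : 2 ^ n ≤ r := by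
        by_contra hc
        rw [Nat.testBit_lt_two_pow (by omega)] at hb
        exact Bool.false_ne_true hb
      have hq2 : r - 2 ^ n < 2 ^ n := by
        have : 2 ^ (n + 1) = 2 ^ n + 2 ^ n := by rw [pow_succ]; ring
        omega
      have hrq : r = 2 ^ n + (r - 2 ^ n) := by omega
      have hcong : innerN arr r (List.range n) [] (-2) =
          innerN arr (r - 2 ^ n) (List.range n) [] (-2) := by
        apply innerN_congr
        intro i hi
        calc r.testBit i = (2 ^ n + (r - 2 ^ n)).testBit i := by rw [← hrq]
          _ = (r - 2 ^ n).testBit i := testBit_pow_add n (r - 2 ^ n) i (List.mem_range.mp hi)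
      rw [hcong]
      by_cases hq0 : r - 2 ^ n = 0
      · exfalso
        simp only [goodB, decide_eq_false_iff_not, not_exists, not_and] at hbad
        have := hbad n (by omega) n (by omega) (le_refl n)
        have hps : 2 ^ (n + 1) = 2 ^ n + 2 ^ n := by rw [pow_succ]; ring
        omega
      · by_cases hgq : goodB n (r - 2 ^ n) = true
        · simp only [goodB, decide_eq_true_eq] at hgq
          obtain ⟨s, hs, t, htn, hst, hqr⟩ := hgq
          rw [hqr, innerN_good arr n s t (by omega) hst htn]
          simp only [if_true]
          by_cases htn1 : t + 1 = n
          · exfalso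
            simp only [goodB, decide_eq_false_iff_not, not_exists, not_and] at hbad
            have := hbad s (by omega) n (by omega) (by omega)
            have hps : 2 ^ (n + 1) = 2 ^ n + 2 ^ n := by rw [pow_succ]; ring
            have h2s : 2 ^ s ≤ 2 ^ (t + 1) := Nat.pow_le_pow_right (by norm_num) (by omega)
            have h2t : 2 ^ (t + 1) = 2 ^ n := by rw [htn1]
            omega
          · have hcnd : ¬ ((n : Int) - (t : Int) = 1) := by
              intro hc
              apply htn1
              omega
            simp [innerN, hb, hcnd, sliceN_ne_nil arr s t hst (by omega)]
        · have hih := ih (by omega) (r - 2 ^ n) hq2 hq0 (by simpa using hgq)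
          rcases hres : innerN arr (r - 2 ^ n) (List.range n) [] (-2) with ⟨su, la, v⟩
          rw [hres] at hih
          simp only at hih
          subst hih
          simp
    · have hr2 : r < 2 ^ n := by
        by_contra hc
        have hps : 2 ^ (n + 1) = 2 ^ n + 2 ^ n := by rw [pow_succ]; ring
        have hdiv : r / 2 ^ n = 1 :=
          Nat.div_eq_of_lt_le (by omega) (by omega)
        simp [Nat.testBit, Nat.shiftRight_eq_div_pow, hdiv] at hb
      have hgn : goodB n r = false := by
        simp only [goodB, decide_eq_false_iff_not, not_exists, not_and] at hbad ⊢
        intro s hs t htn hst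
        exact hbad s (by omega) t (by omega) hst
      have hih := ih (by omega) r hr2 hr0 hgn
      rcases hres : innerN arr r (List.range n) [] (-2) with ⟨su, la, v⟩
      rw [hres] at hih
      simp only at hih
      subst hih
      simp

theorem filter_zero (m : Nat) (hm : 0 < m) :
    (List.range m).filter (fun q => decide (q = 0)) = [0] := by
  obtain ⟨k, rfl⟩ : ∃ k, m = k + 1 := ⟨m - 1, by omega⟩
  rw [List.range_succ_eq_map]
  simp [List.filter_map, List.filter_eq_nil_iff]

-- enumeration of the suffix-run values 2^n - 2^s inside range (2^n), in order
theorem enum_suffix (n : Nat) :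
    (List.range (2 ^ n)).filter (fun q => decide (∃ s ≤ n, q = 2 ^ n - 2 ^ s)) =
      (List.range (n + 1)).map (fun k => 2 ^ n - 2 ^ (n - k)) := by
  induction n with
  | zero => decide
  | succ n ih =>
    have hsplit : List.range (2 ^ (n + 1)) =
        List.range (2 ^ n) ++ (List.range (2 ^ n)).map (fun q => 2 ^ n + q) := by
      rw [← List.range_add]
      congr 1
      rw [pow_succ]; ring
    rw [hsplit, List.filter_append, List.filter_map]
    have hfirst : (List.range (2 ^ n)).filter
        (fun q => decide (∃ s ≤ n + 1, q = 2 ^ (n + 1) - 2 ^ s)) =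
        (List.range (2 ^ n)).filter (fun q => decide (q = 0)) := by
      apply List.filter_congr
      intro q hq
      have hqlt : q < 2 ^ n := List.mem_range.mp hq
      simp only [decide_eq_decide]
      constructor
      · rintro ⟨s, hs, rfl⟩
        rcases Nat.lt_or_ge s (n + 1) with h | h
        · exfalso
          have h1 : 2 ^ s ≤ 2 ^ n := Nat.pow_le_pow_right (by norm_num) (by omega)
          have h2 : 2 ^ (n + 1) = 2 ^ n + 2 ^ n := by rw [pow_succ]; ring
          omega
        · have : s = n + 1 := by omega
          subst this
          omega
      · rintro rfl
        exact ⟨n + 1, le_refl _, by omega⟩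
    rw [hfirst, filter_zero (2 ^ n) (by positivity)]
    have hsecond : (List.range (2 ^ n)).filter
        ((fun q => decide (∃ s ≤ n + 1, q = 2 ^ (n + 1) - 2 ^ s)) ∘ (fun q => 2 ^ n + q)) =
        (List.range (2 ^ n)).filter (fun q => decide (∃ s ≤ n, q = 2 ^ n - 2 ^ s)) := by
      apply List.filter_congr
      intro q hq
      have hqlt : q < 2 ^ n := List.mem_range.mp hq
      have h2 : 2 ^ (n + 1) = 2 ^ n + 2 ^ n := by rw [pow_succ]; ring
      simp only [Function.comp, decide_eq_decide]
      constructor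
      · rintro ⟨s, hs, heq⟩
        rcases Nat.lt_or_ge s (n + 1) with h | h
        · have h1 : 2 ^ s ≤ 2 ^ n := Nat.pow_le_pow_right (by norm_num) (by omega)
          exact ⟨s, by omega, by omega⟩
        · have : s = n + 1 := by omega
          subst this
          omega
      · rintro ⟨s, hs, rfl⟩
        have h1 : 2 ^ s ≤ 2 ^ n := Nat.pow_le_pow_right (by norm_num) hs
        exact ⟨s, by omega, by omega⟩
    rw [hsecond, ih]
    have hrhs : (List.range (n + 1 + 1)).map (fun k => 2 ^ (n + 1) - 2 ^ (n + 1 - k)) =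
        0 :: (List.range (n + 1)).map (fun k => 2 ^ n + (2 ^ n - 2 ^ (n - k))) := by
      rw [show n + 1 + 1 = 1 + (n + 1) by omega, List.range_add, List.map_append, List.map_map]
      simp [Function.comp]
      intro a ha
      have h1 : 2 ^ (n - a) ≤ 2 ^ n := Nat.pow_le_pow_right (by norm_num) (by omega)
      have h2 : 2 ^ (n + 1) = 2 ^ n + 2 ^ n := by rw [pow_succ]; ring
      have h3 : n + 1 - (1 + a) = n - a := by omega
      rw [h3]
      show 2 ^ (n + 1) - 2 ^ (n - a) = 2 ^ n + (2 ^ n - 2 ^ (n - a))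
      rw [h2, Nat.add_sub_assoc h1]
    rw [hrhs, List.map_map]
    simp [Function.comp]

theorem enum_good (n : Nat) :
    (List.range (2 ^ n)).filter (goodB n) =
      (List.range n).flatMap (fun e => (List.range (e + 1)).map (fun k => 2 ^ (e + 1) - 2 ^ (e - k))) := by
  induction n with
  | zero => decide
  | succ n ih =>
    have hsplit : List.range (2 ^ (n + 1)) =
        List.range (2 ^ n) ++ (List.range (2 ^ n)).map (fun q => 2 ^ n + q) := by
      rw [← List.range_add]
      congr 1
      rw [pow_succ]; ring
    rw [hsplit, List.filter_append, List.filter_map]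
    have hfirst : (List.range (2 ^ n)).filter (goodB (n + 1)) =
        (List.range (2 ^ n)).filter (goodB n) := by
      apply List.filter_congr
      intro r hr
      have hrlt : r < 2 ^ n := List.mem_range.mp hr
      simp only [goodB, decide_eq_decide]
      constructor
      · rintro ⟨s, hs, t, ht, hst, rfl⟩
        rcases Nat.lt_or_ge t n with h | h
        · exact ⟨s, by omega, t, h, hst, rfl⟩
        · exfalso
          have htn : t = n := by omega
          subst htn
          have h1 : 2 ^ s ≤ 2 ^ t := Nat.pow_le_pow_right (by norm_num) hst
          have h2 : 2 ^ (t + 1) = 2 ^ t + 2 ^ t := by rw [pow_succ]; ring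
          omega
      · rintro ⟨s, hs, t, ht, hst, rfl⟩
        exact ⟨s, by omega, t, by omega, hst, rfl⟩
    rw [hfirst, ih]
    have hsecond : (List.range (2 ^ n)).filter ((goodB (n + 1)) ∘ (fun q => 2 ^ n + q)) =
        (List.range (2 ^ n)).filter (fun q => decide (∃ s ≤ n, q = 2 ^ n - 2 ^ s)) := by
      apply List.filter_congr
      intro q hq
      have hqlt : q < 2 ^ n := List.mem_range.mp hq
      have hps : 2 ^ (n + 1) = 2 ^ n + 2 ^ n := by rw [pow_succ]; ring
      simp only [Function.comp, goodB, decide_eq_decide]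
      constructor
      · rintro ⟨s, hs, t, ht, hst, heq⟩
        rcases Nat.lt_or_ge (t + 1) (n + 1) with h | h
        · exfalso
          have h1 : 2 ^ (t + 1) ≤ 2 ^ n := Nat.pow_le_pow_right (by norm_num) (by omega)
          have hlt : 2 ^ n + q < 2 ^ n + q := by
            calc 2 ^ n + q = 2 ^ (t + 1) - 2 ^ s := heq
              _ < 2 ^ (t + 1) := Nat.sub_lt (Nat.two_pow_pos _) (Nat.two_pow_pos _)
              _ ≤ 2 ^ n := h1
              _ ≤ 2 ^ n + q := Nat.le_add_right _ _
          exact absurd hlt (lt_irrefl _)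
        · have htn : t = n := by omega
          rw [htn] at heq
          have h2 : 2 ^ s ≤ 2 ^ n := Nat.pow_le_pow_right (by norm_num) (by omega)
          exact ⟨s, by omega, by omega⟩
      · rintro ⟨s, hs, rfl⟩
        have h2 : 2 ^ s ≤ 2 ^ n := Nat.pow_le_pow_right (by norm_num) hs
        exact ⟨s, by omega, n, by omega, by omega, by omega⟩
    rw [hsecond, enum_suffix, List.map_map]
    rw [List.range_succ, List.flatMap_append]
    congr 1
    simp only [List.flatMap_cons, List.flatMap_nil, List.append_nil]
    rw [← List.range_succ]
    apply List.map_congr_left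
    intro k hk
    have hklt : k < n + 1 := List.mem_range.mp hk
    simp only [Function.comp]
    have h1 : 2 ^ (n - k) ≤ 2 ^ n := Nat.pow_le_pow_right (by norm_num) (by omega)
    have hps : 2 ^ (n + 1) = 2 ^ n + 2 ^ n := by rw [pow_succ]; ring
    show 2 ^ n + (2 ^ n - 2 ^ (n - k)) = 2 ^ (n + 1) - 2 ^ (n - k)
    rw [hps, Nat.add_sub_assoc h1]

-- A in closed Nat form
theorem portA_eq (arr : List Int) :
    adjacent_subsets_iterative arr =
      ((List.range (2 ^ arr.length)).filter (goodB arr.length)).map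
        (fun r => (innerN arr r (List.range arr.length) [] (-2)).1) := by
  unfold adjacent_subsets_iterative
  dsimp only
  have hshift : ((1 : Int) <<< arr.length) = ((2 ^ arr.length : Nat) : Int) := by
    simp [Int.shiftLeft_eq]
  rw [hshift, PySem.List.pyRange_zero_nat, List.foldl_map]
  have hbody : ∀ (result : List (List Int)), ∀ r ∈ List.range (2 ^ arr.length),
      (if (innerGoA arr (r : Int) (List.range arr.length) [] (-2)).2.2 = true ∧
          (innerGoA arr (r : Int) (List.range arr.length) [] (-2)).1 ≠ [] then
        result ++ [(innerGoA arr (r : Int) (List.range arr.length) [] (-2)).1] else result) =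
      (if goodB arr.length r = true then
        result ++ [(innerN arr r (List.range arr.length) [] (-2)).1] else result) := by
    intro result r hr
    have hrlt : r < 2 ^ arr.length := List.mem_range.mp hr
    rw [innerGoA_eq_innerN]
    by_cases hr0 : r = 0
    · subst hr0
      rw [innerN_skip arr 0 _ (fun i _ => Nat.zero_testBit i)]
      have hg : goodB arr.length 0 = false := by
        simp only [goodB, decide_eq_false_iff_not, not_exists, not_and]
        intro s hs t ht hst heq
        have h1 : 2 ^ s < 2 ^ (t + 1) := Nat.pow_lt_pow_right (by norm_num) (by omega)
        omega
      simp [hg]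
    · by_cases hg : goodB arr.length r = true
      · have hgx := hg
        simp only [goodB, decide_eq_true_eq] at hgx
        obtain ⟨s, hs, t, ht, hst, rfl⟩ := hgx
        rw [innerN_good arr arr.length s t (le_refl _) hst ht]
        simp [hg, sliceN_ne_nil arr s t hst (by omega)]
      · have hbad := innerN_bad arr arr.length (le_refl _) r hrlt hr0
          (by simpa using hg)
        rcases hres : innerN arr r (List.range arr.length) [] (-2) with ⟨su, la, v⟩
        rw [hres] at hbad
        simp only at hbad
        subst hbad
        simp [hg]
  rw [PySem.List.foldl_congr_mem _ _ _ _ hbody]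
  rw [PySem.List.foldl_append_if]
  simp

-- B in closed Nat form
theorem portB_eq (arr : List Int) :
    adjacent_subsets_iterative_alt arr =
      (List.range arr.length).flatMap (fun e =>
        (List.range (e + 1)).map (fun k => sliceN arr (e - k) e)) := by
  unfold adjacent_subsets_iterative_alt
  rw [show (arr.length : Int) = ((arr.length : Nat) : Int) by simp, PySem.List.pyRange_zero_nat,
    List.flatMap_map]
  apply List.flatMap_congr
  intro e he
  have helt : e < arr.length := List.mem_range.mp he
  rw [show ((e : Nat) : Int) + 2 = ((e + 2 : Nat) : Int) by push_cast; ring,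
    PySem.List.pyRange_one]
  rw [show ((e + 2 : Nat) : Int) - 1 = ((e + 1 : Nat) : Int) by push_cast; ring]
  rw [Int.toNat_natCast, List.map_map]
  apply List.map_congr_left
  intro k hk
  have hklt : k < e + 1 := List.mem_range.mp hk
  simp only [Function.comp]
  rw [show ((e : Nat) : Int) - (1 + (k : Nat)) + 1 = (((e - k : Nat) : Nat) : Int) by push_cast [Nat.cast_sub (by omega : k ≤ e)]; ring,
    show ((e : Nat) : Int) + 1 = (((e + 1 : Nat) : Nat) : Int) by push_cast; ring,
    PySem.List.slice_natCast]
  unfold sliceN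
  rfl

-- ===== VERDICT (by name: the statement is the Claim_ definition above) =====
theorem adjacent_subsets_iterative_spec : Claim_equal_adjacent_subsets_iterative := by
  intro arr _
  unfold Spec_adjacent_subsets_iterative
  rw [portA_eq, portB_eq, enum_good, List.map_flatMap]
  apply List.flatMap_congr
  intro e he
  have helt : e < arr.length := List.mem_range.mp he
  rw [List.map_map]
  apply List.map_congr_left
  intro k hk
  have hklt : k < e + 1 := List.mem_range.mp hk
  simp only [Function.comp]
  rw [innerN_good arr arr.length (e - k) e (le_refl _) (by omega) helt]
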